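-- pv_equiv track=rewrite | github.com/miethe/MeatyMusic | services/api/test_profanity_direct.py | _normalize_l33t_speak
-- ===== SOURCE A (Python) =====
-- def _normalize_l33t_speak(text: str) -> str:
--     """Convert l33t speak to normal text."""
--     normalized = text.lower()
--     replacements = {
--         '@': 'a', '4': 'a', '^': 'a',
--         '3': 'e',
--         '1': 'i', '!': 'i', '|': 'i',
--         '0': 'o',
--         '$': 's', '5': 's',
--         '7': 't', '+': 't',
--     }
--
--     for l33t_char, normal_char in replacements.items():
--         normalized = normalized.replace(l33t_char, normal_char)
--
--     return normalized
-- ===== SOURCE B (Python) =====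
-- def _l33t_char(c: str) -> str:
--     """Map one (already lowercased) character to its plain-letter form."""
--     if c in '@4^':
--         return 'a'
--     if c == '3':
--         return 'e'
--     if c in '1!|':
--         return 'i'
--     if c == '0':
--         return 'o'
--     if c in '$5':
--         return 's'
--     if c in '7+':
--         return 't'
--     return c
--
--
-- def _normalize_l33t_speak(text: str) -> str:
--     """Convert l33t speak to normal text."""
--     out = []
--     for ch in text.lower():
--         out.append(_l33t_char(ch))
--     return ''.join(out)
-- ===== Notes on version B (the rewrite author's own statement) =====
-- stated objective: idiomatic
-- what changed: B drops the replacement dict and its twelve full-string str.replace passes entirely: it makes one left-to-right pass over the lowercased text, classifying each character with an if-chain helper (_l33t_char) and accumulating the mapped characters in a list joined at the end.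
import Mathlib
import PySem

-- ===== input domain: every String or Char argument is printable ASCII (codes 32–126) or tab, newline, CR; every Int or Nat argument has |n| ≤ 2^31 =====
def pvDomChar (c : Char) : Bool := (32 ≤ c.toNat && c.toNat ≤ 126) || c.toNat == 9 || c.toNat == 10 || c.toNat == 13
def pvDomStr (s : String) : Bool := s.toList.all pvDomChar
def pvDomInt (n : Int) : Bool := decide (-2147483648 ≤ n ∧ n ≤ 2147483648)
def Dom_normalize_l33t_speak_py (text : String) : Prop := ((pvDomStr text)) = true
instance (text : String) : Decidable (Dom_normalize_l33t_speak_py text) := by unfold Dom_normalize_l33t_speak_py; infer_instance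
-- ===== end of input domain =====

-- B drops the replacement dict and A's twelve full-string replace passes: one left-to-right
-- accumulator pass mapping each lowercased character through an if-chain (idiomatic single traversal).


-- ===== PORT A =====
-- the `replacements` dict literal of A, in insertion order
def pvRepl : PySem.Dict String String :=
  (((((((((((PySem.Dict.empty.insert "@" "a").insert "4" "a").insert "^" "a").insert
    "3" "e").insert "1" "i").insert "!" "i").insert "|" "i").insert "0" "o").insert
    "$" "s").insert "5" "s").insert "7" "t").insert "+" "t"

def normalize_l33t_speak_py (text : String) : String :=
  let normalized := PySem.Str.lower text
  pvRepl.items.foldl (fun n p => PySem.Str.replace n p.1 p.2) normalized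

-- ===== PORT B =====
-- _l33t_char: if-chain classifying one lowercased character (each Python return is a 1-char string)
def pvL33tChar (c : Char) : Char :=
  if c = '@' ∨ c = '4' ∨ c = '^' then 'a'
  else if c = '3' then 'e'
  else if c = '1' ∨ c = '!' ∨ c = '|' then 'i'
  else if c = '0' then 'o'
  else if c = '$' ∨ c = '5' then 's'
  else if c = '7' ∨ c = '+' then 't'
  else c

-- the `for ch in text.lower(): out.append(_l33t_char(ch))` loop, accumulator reversed at the end
def pvGoB : List Char → List Char → List Char
  | [], out => out.reverse
  | c :: rest, out => pvGoB rest (pvL33tChar c :: out)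

def normalize_l33t_speak_py_alt (text : String) : String :=
  String.ofList (pvGoB (PySem.Chars.lower text.toList) [])

-- ===== PRECONDITION & SPEC =====
def Spec_normalize_l33t_speak_py (text : String) (out : String) : Prop := out = normalize_l33t_speak_py_alt text
instance (text : String) (out : String) : Decidable (Spec_normalize_l33t_speak_py text out) := by unfold Spec_normalize_l33t_speak_py; infer_instance

-- ===== CLAIM (what is proved, stated in full; the proofs are below) =====
def Claim_equal_normalize_l33t_speak_py : Prop := ∀ (text : String), Dom_normalize_l33t_speak_py text → Spec_normalize_l33t_speak_py text (normalize_l33t_speak_py text)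

-- ===== LEMMAS AND PROOFS =====

-- replacing a single character k by a single character v is a per-character map
theorem go_single (k v : Char) (fuel : Nat) : ∀ (l acc : List Char), l.length ≤ fuel →
    PySem.Chars.replace.go [k] [v] fuel l acc = acc.reverse ++ l.map (fun c => if c = k then v else c) := by
  induction fuel with
  | zero =>
    intro l acc h
    have : l = [] := List.eq_nil_of_length_eq_zero (Nat.le_zero.mp h)
    subst this
    simp [PySem.Chars.replace.go]
  | succ n ih =>
    intro l acc h
    cases l with
    | nil => simp [PySem.Chars.replace.go]
    | cons c t =>
      rw [PySem.Chars.replace.go]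
      by_cases hc : c = k
      · subst hc
        simp only [List.isPrefixOf, BEq.rfl]
        rw [ih _ _ (by simpa using Nat.le_of_succ_le_succ h)]
        simp
      · have hp : ([k].isPrefixOf (c :: t)) = false := by
          simp [List.isPrefixOf]
          exact fun hh => hc hh.symm
        rw [hp]
        simp only [Bool.false_eq_true, if_false]
        rw [ih _ _ (by simpa using Nat.le_of_succ_le_succ h)]
        simp [hc]

theorem replace_single (k v : Char) (s : List Char) :
    PySem.Chars.replace s [k] [v] = s.map (fun c => if c = k then v else c) := by
  rw [PySem.Chars.replace]
  simp only [List.isEmpty_cons, Bool.false_eq_true, if_false]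
  exact go_single k v s.length s [] le_rfl

-- single-character replacement as a char function, and A's chain of twelve of them
def pvF1 (k v c : Char) : Char := if c = k then v else c

def pvFA (c : Char) : Char :=
  pvF1 '+' 't' (pvF1 '7' 't' (pvF1 '5' 's' (pvF1 '$' 's' (pvF1 '0' 'o' (pvF1 '|' 'i'
    (pvF1 '!' 'i' (pvF1 '1' 'i' (pvF1 '3' 'e' (pvF1 '^' 'a' (pvF1 '4' 'a' (pvF1 '@' 'a' c)))))))))))

theorem str_rep (s : String) (k v : Char) :
    (PySem.Str.replace s (String.ofList [k]) (String.ofList [v])).toList = s.toList.map (pvF1 k v) := by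
  simp [PySem.Str.toList_replace, replace_single, pvF1]

theorem A_toList (text : String) :
    (normalize_l33t_speak_py text).toList = (PySem.Chars.lower text.toList).map pvFA := by
  rw [normalize_l33t_speak_py]
  have hitems : pvRepl.items =
      [("@","a"),("4","a"),("^","a"),("3","e"),("1","i"),("!","i"),
       ("|","i"),("0","o"),("$","s"),("5","s"),("7","t"),("+","t")] := by decide
  rw [hitems]
  simp only [List.foldl_cons, List.foldl_nil, show ("@":String) = String.ofList ['@'] from by decide, show ("4":String) = String.ofList ['4'] from by decide, show ("^":String) = String.ofList ['^'] from by decide, show ("3":String) = String.ofList ['3'] from by decide, show ("1":String) = String.ofList ['1'] from by decide, show ("!":String) = String.ofList ['!'] from by decide, show ("|":String) = String.ofList ['|'] from by decide, show ("0":String) = String.ofList ['0'] from by decide, show ("$":String) = String.ofList ['$'] from by decide, show ("5":String) = String.ofList ['5'] from by decide, show ("7":String) = String.ofList ['7'] from by decide, show ("+":String) = String.ofList ['+'] from by decide, show ("a":String) = String.ofList ['a'] from by decide, show ("e":String) = String.ofList ['e'] from by decide, show ("i":String) = String.ofList ['i'] from by decide, show ("o":String) = String.ofList ['o'] from by decide,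 show ("s":String) = String.ofList ['s'] from by decide, show ("t":String) = String.ofList ['t'] from by decide]
  simp only [str_rep, List.map_map, PySem.Str.toList_lower]
  have : (pvF1 '+' 't' ∘ pvF1 '7' 't' ∘ pvF1 '5' 's' ∘ pvF1 '$' 's' ∘ pvF1 '0' 'o' ∘ pvF1 '|' 'i' ∘ pvF1 '!' 'i' ∘ pvF1 '1' 'i' ∘ pvF1 '3' 'e' ∘ pvF1 '^' 'a' ∘ pvF1 '4' 'a' ∘ pvF1 '@' 'a') = pvFA := by
    funext c
    simp only [Function.comp_apply, pvFA]
  rw [this]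

-- A's composed chain of twelve single-char replacements is B's if-chain classifier
theorem fa_eq_l33t (c : Char) : pvFA c = pvL33tChar c := by
  by_cases h1 : c = '@'; · subst h1; decide
  by_cases h2 : c = '4'; · subst h2; decide
  by_cases h3 : c = '^'; · subst h3; decide
  by_cases h4 : c = '3'; · subst h4; decide
  by_cases h5 : c = '1'; · subst h5; decide
  by_cases h6 : c = '!'; · subst h6; decide
  by_cases h7 : c = '|'; · subst h7; decide
  by_cases h8 : c = '0'; · subst h8; decide
  by_cases h9 : c = '$'; · subst h9; decide
  by_cases h10 : c = '5'; · subst h10; decide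
  by_cases h11 : c = '7'; · subst h11; decide
  by_cases h12 : c = '+'; · subst h12; decide
  simp [pvFA, pvF1, pvL33tChar, h1, h2, h3, h4, h5, h6, h7, h8, h9, h10, h11, h12]

-- the accumulator loop is a map
theorem goB_eq (l : List Char) : ∀ out : List Char, pvGoB l out = out.reverse ++ l.map pvL33tChar := by
  induction l with
  | nil => intro out; simp [pvGoB]
  | cons c t ih => intro out; simp [pvGoB, ih]

-- ===== VERDICT (by name: the statement is the Claim_ definition above) =====
theorem normalize_l33t_speak_py_spec : Claim_equal_normalize_l33t_speak_py := by
  intro text _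
  show normalize_l33t_speak_py text = normalize_l33t_speak_py_alt text
  rw [normalize_l33t_speak_py_alt, goB_eq]
  have : (PySem.Chars.lower text.toList).map pvL33tChar = (PySem.Chars.lower text.toList).map pvFA :=
    List.map_congr_left (fun c _ => (fa_eq_l33t c).symm)
  rw [List.reverse_nil, List.nil_append, this, ← A_toList, String.ofList_toList]
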